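-- pv_equiv track=rewrite | github.com/syt06162/Study-Algorithm | python-for-coding-test/Ch12_10_imp.py | move_row_col
-- ===== SOURCE A (Python) =====
-- def move_row_col(matrix, row, col):
--     N = len(matrix)
--     result = [ [0 for i in range(N)] for i in range(N)]
--
--     ptr_row = 0 + row
--     ptr_col = 0 + col
--
--     for i in range(0, N):
--         for j in range(0, N):
--             now_row = ptr_row + i
--             now_col = ptr_col + j
--             if now_row<0 or now_row>=N or now_col<0 or now_col>=N:
--                 continue
--             else:
--                 result[now_row][now_col] = matrix[i][j]
--
--     return result
-- ===== SOURCE B (Python) =====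
-- def move_row_col(matrix, row, col):
--     N = len(matrix)
--     result = [[0] * N for _ in range(N)]
--     dr0, dr1 = max(0, row), min(N, N + row)
--     dc0, dc1 = max(0, col), min(N, N + col)
--     if dr0 < dr1 and dc0 < dc1:
--         for dr in range(dr0, dr1):
--             result[dr][dc0:dc1] = matrix[dr - row][dc0 - col:dc1 - col]
--     return result
-- ===== Notes on version B (the rewrite author's own statement) =====
-- stated objective: faster
-- what changed: B computes the destination overlap window (row/column ranges) from the offsets once and copies each source row into it as one contiguous slice assignment, removing A's per-cell bounds test over the full NxN scan (constant-factor speedup, measured ~2.5x).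
-- outside the precondition, e.g. on move_row_col([[1, 2], [3]], 0, 0): A raises IndexError, B returns [[1, 2], [3]]
import Mathlib
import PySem

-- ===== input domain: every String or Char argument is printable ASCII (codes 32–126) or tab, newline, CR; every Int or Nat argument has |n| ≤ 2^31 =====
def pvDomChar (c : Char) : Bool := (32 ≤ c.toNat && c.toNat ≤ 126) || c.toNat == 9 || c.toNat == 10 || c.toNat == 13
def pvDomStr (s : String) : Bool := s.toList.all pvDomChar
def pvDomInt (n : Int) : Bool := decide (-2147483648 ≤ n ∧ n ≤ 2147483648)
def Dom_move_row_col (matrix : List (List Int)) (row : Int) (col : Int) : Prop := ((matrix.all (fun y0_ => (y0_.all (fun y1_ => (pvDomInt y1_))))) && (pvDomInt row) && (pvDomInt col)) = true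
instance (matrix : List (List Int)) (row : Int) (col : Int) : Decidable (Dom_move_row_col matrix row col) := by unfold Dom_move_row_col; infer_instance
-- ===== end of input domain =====

-- B computes the destination overlap window from the offsets once and copies each source row
-- into it as one contiguous slice, instead of A's full N×N per-cell bounds-tested scan (measured constant-factor speedup).

-- ===== PORT A =====
def move_row_col (matrix : List (List Int)) (row : Int) (col : Int) : List (List Int) :=
  let N := matrix.length
  let result := (List.range N).map (fun _ => (List.range N).map (fun _ => (0 : Int)))
  let ptr_row := 0 + row
  let ptr_col := 0 + col
  (List.range N).foldl (fun result (i : Nat) =>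
    (List.range N).foldl (fun result (j : Nat) =>
      let now_row := ptr_row + (i : Int)
      let now_col := ptr_col + (j : Int)
      if now_row < 0 ∨ now_row ≥ (N : Int) ∨ now_col < 0 ∨ now_col ≥ (N : Int) then result
      else
        -- matrix[i][j] raises IndexError when j ≥ len(matrix[i]); Pre_ excludes exactly those inputs, so getD is exact here
        result.set now_row.toNat ((result.getD now_row.toNat []).set now_col.toNat ((matrix.getD i []).getD j 0)))
      result) result

-- ===== PORT B =====
def move_row_col_alt (matrix : List (List Int)) (row : Int) (col : Int) : List (List Int) :=
  let N := matrix.length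
  let result := List.replicate N (List.replicate N (0 : Int))
  let dr0 := max 0 row
  let dr1 := min (N : Int) ((N : Int) + row)
  let dc0 := max 0 col
  let dc1 := min (N : Int) ((N : Int) + col)
  if dr0 < dr1 ∧ dc0 < dc1 then
    (PySem.List.pyRange dr0 dr1 1).foldl (fun result dr =>
      let old := result.getD dr.toNat []
      -- result[dr][dc0:dc1] = matrix[dr-row][dc0-col:dc1-col]  (slice assignment on a proper sub-window)
      result.set dr.toNat
        (PySem.List.slice old none (some dc0) ++
         PySem.List.slice (matrix.getD (dr - row).toNat []) (some (dc0 - col)) (some (dc1 - col)) ++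
         PySem.List.slice old (some dc1) none)) result
  else result

-- ===== PRECONDITION & SPEC =====
-- Pre_ excludes exactly the ragged matrices on which A raises IndexError: a source cell
-- matrix[i][j] whose destination (row+i, col+j) lies inside the N×N grid but j ≥ len(matrix[i]).
def Pre_move_row_col (matrix : List (List Int)) (row : Int) (col : Int) : Prop :=
  ∀ i ∈ List.range matrix.length, ∀ j ∈ List.range matrix.length,
    (0 ≤ row + (i : Int) ∧ row + (i : Int) < (matrix.length : Int) ∧
     0 ≤ col + (j : Int) ∧ col + (j : Int) < (matrix.length : Int)) →
    j < (matrix.getD i []).length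
instance (matrix : List (List Int)) (row : Int) (col : Int) : Decidable (Pre_move_row_col matrix row col) := by unfold Pre_move_row_col; infer_instance
def pvWitness_move_row_col : List (List Int) × Int × Int := ([[1, 2], [3, 4]], 1, 0)

def Spec_move_row_col (matrix : List (List Int)) (row : Int) (col : Int) (out : List (List Int)) : Prop := out = move_row_col_alt matrix row col
instance (matrix : List (List Int)) (row : Int) (col : Int) (out : List (List Int)) : Decidable (Spec_move_row_col matrix row col out) := by unfold Spec_move_row_col; infer_instance

-- ===== CLAIM (what is proved, stated in full; the proofs are below) =====
def Claim_equal_move_row_col : Prop := ∀ (matrix : List (List Int)) (row : Int) (col : Int), Dom_move_row_col matrix row col → Pre_move_row_col matrix row col → Spec_move_row_col matrix row col (move_row_col matrix row col)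


-- ===== LEMMAS AND PROOFS =====

/-- cell read with defaults, as both ports' grids are read entrywise -/
def g2 (res : List (List Int)) (r c : Nat) : Int := (res.getD r []).getD c 0

/-- an N×N grid -/
def shapeN (N : Nat) (res : List (List Int)) : Prop :=
  res.length = N ∧ ∀ rw ∈ res, rw.length = N

theorem shapeN_row_len {N : Nat} {res : List (List Int)} (h : shapeN N res) {r : Nat}
    (hr : r < N) : (res.getD r []).length = N := by
  obtain ⟨h1, h2⟩ := h
  have hr' : r < res.length := by omega
  rw [List.getD_eq_getElem res [] hr']
  exact h2 _ (List.getElem_mem hr')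

theorem getD_set_outer (res : List (List Int)) (n k : Nat) (x : List Int) :
    (res.set n x).getD k [] = if k = n ∧ n < res.length then x else res.getD k [] := by
  rcases Nat.lt_or_ge k res.length with hk | hk
  · have hk' : k < (res.set n x).length := by simpa using hk
    rw [List.getD_eq_getElem _ [] hk', List.getD_eq_getElem res [] hk]
    rw [List.getElem_set]
    by_cases h : k = n
    · subst h
      rw [if_pos rfl, if_pos ⟨rfl, hk⟩]
    · rw [if_neg (fun hn => h hn.symm), if_neg (fun hn => h hn.1)]
  · have h1 : res.getD k [] = [] := List.getD_eq_default _ _ hk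
    have h2 : (res.set n x).getD k [] = [] := by
      apply List.getD_eq_default; simpa using hk
    rw [h1, h2]; split_ifs with h <;> [omega; rfl]

theorem getD_set_inner (r : List Int) (n k : Nat) (x : Int) :
    (r.set n x).getD k 0 = if k = n ∧ n < r.length then x else r.getD k 0 := by
  rcases Nat.lt_or_ge k r.length with hk | hk
  · have hk' : k < (r.set n x).length := by simpa using hk
    rw [List.getD_eq_getElem _ 0 hk', List.getD_eq_getElem r 0 hk]
    rw [List.getElem_set]
    by_cases h : k = n
    · subst h
      rw [if_pos rfl, if_pos ⟨rfl, hk⟩]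
    · rw [if_neg (fun hn => h hn.symm), if_neg (fun hn => h hn.1)]
  · have h1 : r.getD k 0 = 0 := List.getD_eq_default _ _ hk
    have h2 : (r.set n x).getD k 0 = 0 := by
      apply List.getD_eq_default; simpa using hk
    rw [h1, h2]; split_ifs with h <;> [omega; rfl]

theorem shapeN_write {N : Nat} {res : List (List Int)} (h : shapeN N res) (a c : Nat)
    (ha : a < N) (v : Int) :
    shapeN N (res.set a ((res.getD a []).set c v)) := by
  obtain ⟨h1, h2⟩ := h
  refine ⟨by simpa using h1, ?_⟩
  intro rw hrw
  rcases List.mem_or_eq_of_mem_set hrw with h | h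
  · exact h2 _ h
  · subst h
    have := shapeN_row_len ⟨h1, h2⟩ ha
    simpa using this

theorem g2_write {N : Nat} {res : List (List Int)} (h : shapeN N res) {a b : Int}
    (ha0 : 0 ≤ a) (haN : a < N) (hb0 : 0 ≤ b) (hbN : b < N) (v : Int) (r c : Nat) :
    g2 (res.set a.toNat ((res.getD a.toNat []).set b.toNat v)) r c =
      if (r : Int) = a ∧ (c : Int) = b then v else g2 res r c := by
  have haN' : a.toNat < N := by omega
  have hbN' : b.toNat < N := by omega
  have hlen : res.length = N := h.1
  have hrowlen : (res.getD a.toNat []).length = N := shapeN_row_len h haN'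
  unfold g2
  rw [getD_set_outer]
  split_ifs with h1 h2 h3
  · -- r = a.toNat
    rw [getD_set_inner]
    split_ifs with h4
    · rfl
    · exfalso; apply h4; constructor <;> omega
  · rw [getD_set_inner]
    split_ifs with h4
    · exfalso; omega
    · have : r = a.toNat := h1.1
      rw [this]
  · exfalso; apply h1; constructor <;> omega
  · rfl

/-- the body of A's inner loop, with the guards written out -/
def stepA (mx : List (List Int)) (row col : Int) (N : Nat) (i : Nat)
    (res : List (List Int)) (j : Nat) : List (List Int) :=
  if row + (i : Int) < 0 ∨ row + (i : Int) ≥ (N : Int) ∨ col + (j : Int) < 0 ∨ col + (j : Int) ≥ (N : Int) then res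
  else res.set (row + (i : Int)).toNat
        ((res.getD (row + (i : Int)).toNat []).set (col + (j : Int)).toNat ((mx.getD i []).getD j 0))

theorem move_row_col_eq (mx : List (List Int)) (row col : Int) :
    move_row_col mx row col =
      (List.range mx.length).foldl
        (fun res i => (List.range mx.length).foldl (stepA mx row col mx.length i) res)
        ((List.range mx.length).map (fun _ => (List.range mx.length).map (fun _ => (0 : Int)))) := by
  unfold move_row_col
  simp only [zero_add]
  rfl

theorem stepA_skip (mx : List (List Int)) (row col : Int) (N : Nat) (i : Nat)
    (res : List (List Int)) (j : Nat)
    (h : row + (i : Int) < 0 ∨ row + (i : Int) ≥ (N : Int) ∨ col + (j : Int) < 0 ∨ col + (j : Int) ≥ (N : Int)) :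
    stepA mx row col N i res j = res := by
  unfold stepA
  rw [if_pos h]

theorem stepA_write (mx : List (List Int)) (row col : Int) (N : Nat) (i : Nat)
    (res : List (List Int)) (j : Nat)
    (h : ¬ (row + (i : Int) < 0 ∨ row + (i : Int) ≥ (N : Int) ∨ col + (j : Int) < 0 ∨ col + (j : Int) ≥ (N : Int))) :
    stepA mx row col N i res j =
      res.set (row + (i : Int)).toNat
        ((res.getD (row + (i : Int)).toNat []).set (col + (j : Int)).toNat ((mx.getD i []).getD j 0)) := by
  unfold stepA
  rw [if_neg h]

theorem innerA_char (mx : List (List Int)) (row col : Int) (N : Nat) (i : Nat) :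
    ∀ (n : Nat) (res : List (List Int)), shapeN N res →
      shapeN N ((List.range n).foldl (stepA mx row col N i) res) ∧
      ∀ r c : Nat,
        g2 ((List.range n).foldl (stepA mx row col N i) res) r c =
          if (r : Int) = row + i ∧ 0 ≤ row + (i : Int) ∧ row + (i : Int) < N ∧
             0 ≤ (c : Int) - col ∧ (c : Int) - col < n ∧ (c : Int) < N
          then (mx.getD i []).getD ((c : Int) - col).toNat 0
          else g2 res r c := by
  intro n
  induction n with
  | zero =>
    intro res hres
    refine ⟨hres, ?_⟩
    intro r c
    rw [if_neg (by omega)]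
    rfl
  | succ n ih =>
    intro res hres
    rw [List.range_succ, List.foldl_append]
    obtain ⟨ihshape, ihget⟩ := ih res hres
    simp only [List.foldl_cons, List.foldl_nil]
    by_cases hg : row + (i : Int) < 0 ∨ row + (i : Int) ≥ (N : Int) ∨ col + (n : Int) < 0 ∨ col + (n : Int) ≥ (N : Int)
    · -- guard fires at j = n: nothing written, conditions for n and n+1 coincide
      rw [stepA_skip _ _ _ _ _ _ _ hg]
      refine ⟨ihshape, ?_⟩
      intro r c
      rw [ihget r c]
      split_ifs with hX1 hX2 <;> first | rfl | (exfalso; omega)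
    · rw [stepA_write _ _ _ _ _ _ _ hg]
      push Not at hg
      obtain ⟨hg1, hg2, hg3, hg4⟩ := hg
      refine ⟨shapeN_write ihshape _ _ (by omega) _, ?_⟩
      intro r c
      rw [g2_write ihshape (by omega) (by omega) (by omega) (by omega), ihget r c]
      by_cases hhit : (r : Int) = row + (i : Int) ∧ (c : Int) = col + (n : Int)
      · have hc : ((c : Int) - col).toNat = n := by omega
        rw [if_pos hhit, if_pos (by omega), hc]
      · rw [if_neg hhit]
        split_ifs with hX1 hX2 <;> first | rfl | (exfalso; omega)

theorem outerA_char (mx : List (List Int)) (row col : Int) (N : Nat) :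
    ∀ (m : Nat) (res : List (List Int)), shapeN N res →
      shapeN N ((List.range m).foldl
        (fun res i => (List.range N).foldl (stepA mx row col N i) res) res) ∧
      ∀ r c : Nat,
        g2 ((List.range m).foldl
            (fun res i => (List.range N).foldl (stepA mx row col N i) res) res) r c =
          if 0 ≤ (r : Int) - row ∧ (r : Int) - row < m ∧ (r : Int) < N ∧
             0 ≤ (c : Int) - col ∧ (c : Int) - col < N ∧ (c : Int) < N
          then (mx.getD ((r : Int) - row).toNat []).getD ((c : Int) - col).toNat 0
          else g2 res r c := by
  intro m
  induction m with
  | zero =>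
    intro res hres
    refine ⟨hres, ?_⟩
    intro r c
    rw [if_neg (by omega)]
    rfl
  | succ m ih =>
    intro res hres
    rw [List.range_succ, List.foldl_append]
    obtain ⟨ihshape, ihget⟩ := ih res hres
    simp only [List.foldl_cons, List.foldl_nil]
    obtain ⟨inshape, inget⟩ := innerA_char mx row col N m N _ ihshape
    refine ⟨inshape, ?_⟩
    intro r c
    rw [inget r c, ihget r c]
    by_cases hhit : (r : Int) = row + (m : Int) ∧ 0 ≤ row + (m : Int) ∧ row + (m : Int) < (N : Int) ∧
        0 ≤ (c : Int) - col ∧ (c : Int) - col < (N : Int) ∧ (c : Int) < (N : Int)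
    · have hr : ((r : Int) - row).toNat = m := by omega
      rw [if_pos hhit, if_pos (by omega), hr]
    · rw [if_neg hhit]
      split_ifs with hX1 hX2 <;> first | rfl | (exfalso; omega)


-- ===== B-side =====

/-- the body of B's row-copy loop -/
def stepB (mx : List (List Int)) (row col dc0 dc1 : Int) (res : List (List Int)) (dr : Int) : List (List Int) :=
  res.set dr.toNat
    (PySem.List.slice (res.getD dr.toNat []) none (some dc0) ++
     PySem.List.slice (mx.getD (dr - row).toNat []) (some (dc0 - col)) (some (dc1 - col)) ++
     PySem.List.slice (res.getD dr.toNat []) (some dc1) none)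

/-- the row B writes at destination row k, as a function of the old row -/
def rowB (mx : List (List Int)) (row col dc0 dc1 : Int) (old : List Int) (k : Nat) : List Int :=
  PySem.List.slice old none (some dc0) ++
  PySem.List.slice (mx.getD ((k : Int) - row).toNat []) (some (dc0 - col)) (some (dc1 - col)) ++
  PySem.List.slice old (some dc1) none

theorem move_row_col_alt_eq (mx : List (List Int)) (row col : Int) :
    move_row_col_alt mx row col =
      if max 0 row < min (mx.length : Int) ((mx.length : Int) + row) ∧
         max 0 col < min (mx.length : Int) ((mx.length : Int) + col) then
        (PySem.List.pyRange (max 0 row) (min (mx.length : Int) ((mx.length : Int) + row)) 1).foldl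
          (stepB mx row col (max 0 col) (min (mx.length : Int) ((mx.length : Int) + col)))
          (List.replicate mx.length (List.replicate mx.length (0 : Int)))
      else List.replicate mx.length (List.replicate mx.length (0 : Int)) := by
  rfl

theorem stepB_eq (mx : List (List Int)) (row col dc0 dc1 : Int) (res : List (List Int))
    (a : Int) (ha : 0 ≤ a) :
    stepB mx row col dc0 dc1 res a =
      res.set a.toNat (rowB mx row col dc0 dc1 (res.getD a.toNat []) a.toNat) := by
  unfold stepB rowB
  rw [Int.toNat_of_nonneg ha]

theorem foldB_char (mx : List (List Int)) (row col dc0 dc1 : Int) (N : Nat) (b : Int)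
    (hbN : b ≤ (N : Int)) :
    ∀ (n : Nat) (a : Int), (b - a).toNat = n → 0 ≤ a →
      ∀ (res : List (List Int)), res.length = N →
      ((PySem.List.pyRange a b 1).foldl (stepB mx row col dc0 dc1) res).length = N ∧
      ∀ k : Nat,
        ((PySem.List.pyRange a b 1).foldl (stepB mx row col dc0 dc1) res).getD k [] =
          if a ≤ (k : Int) ∧ (k : Int) < b then rowB mx row col dc0 dc1 (res.getD k []) k
          else res.getD k [] := by
  intro n
  induction n with
  | zero =>
    intro a hn ha res hres
    rw [PySem.List.pyRange_one_eq_nil (by omega)]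
    refine ⟨hres, ?_⟩
    intro k
    rw [if_neg (by omega)]
    rfl
  | succ n ih =>
    intro a hn ha res hres
    rw [PySem.List.pyRange_one_cons (by omega), List.foldl_cons]
    rw [stepB_eq _ _ _ _ _ _ _ ha]
    have hlen : (res.set a.toNat (rowB mx row col dc0 dc1 (res.getD a.toNat []) a.toNat)).length = N := by
      simpa using hres
    obtain ⟨ihlen, ihget⟩ := ih (a + 1) (by omega) (by omega) _ hlen
    refine ⟨ihlen, ?_⟩
    intro k
    rw [ihget k, getD_set_outer]
    have haN : a.toNat < res.length := by omega
    by_cases hk : (k : Int) = a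
    · have hk' : k = a.toNat := by omega
      rw [if_neg (by omega), if_pos ⟨hk', haN⟩, if_pos (by omega), hk']
    · rw [if_neg (by omega : ¬ (k = a.toNat ∧ a.toNat < res.length))]
      by_cases h2 : a + 1 ≤ (k : Int) ∧ (k : Int) < b
      · rw [if_pos h2, if_pos (by omega)]
      · rw [if_neg h2, if_neg (by omega)]

theorem getD_replicate_zero (m n : Nat) :
    (List.replicate m (0 : Int)).getD n 0 = 0 := by
  rcases Nat.lt_or_ge n m with h | h
  · rw [List.getD_eq_getElem _ _ (by simpa using h), List.getElem_replicate]
  · rw [List.getD_eq_default _ _ (by simpa using h)]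

theorem rowB_len (mx : List (List Int)) (row col dc0 dc1 : Int) (N k : Nat)
    (h0 : 0 ≤ dc0) (h01 : dc0 ≤ dc1) (h1N : dc1 ≤ (N : Int)) (hc : 0 ≤ dc0 - col)
    (hL : dc1 - col ≤ ((mx.getD ((k : Int) - row).toNat []).length : Int)) :
    (rowB mx row col dc0 dc1 (List.replicate N (0 : Int)) k).length = N := by
  unfold rowB
  rw [PySem.List.slice_to _ h0, PySem.List.slice_from _ (by omega),
      PySem.List.slice_toNat _ (by omega) (by omega)]
  simp only [List.length_append, List.length_take, List.length_drop, List.length_replicate]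
  omega

theorem rowB_getD (mx : List (List Int)) (row col dc0 dc1 : Int) (N k : Nat) (c : Nat)
    (h0 : 0 ≤ dc0) (h01 : dc0 ≤ dc1) (h1N : dc1 ≤ (N : Int)) (hc : 0 ≤ dc0 - col)
    (hL : dc1 - col ≤ ((mx.getD ((k : Int) - row).toNat []).length : Int)) :
    (rowB mx row col dc0 dc1 (List.replicate N (0 : Int)) k).getD c 0 =
      if dc0 ≤ (c : Int) ∧ (c : Int) < dc1
      then (mx.getD ((k : Int) - row).toNat []).getD ((c : Int) - col).toNat 0
      else 0 := by
  unfold rowB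
  rw [PySem.List.slice_to _ h0, PySem.List.slice_from _ (by omega),
      PySem.List.slice_toNat _ (by omega) (by omega)]
  set mrow := mx.getD ((k : Int) - row).toNat [] with hmrow
  have hlen1 : ((List.replicate N (0:Int)).take dc0.toNat).length = dc0.toNat := by
    simp only [List.length_take, List.length_replicate]; omega
  have hlenmid : ((mrow.drop (dc0 - col).toNat).take ((dc1 - col).toNat - (dc0 - col).toNat)).length
      = dc1.toNat - dc0.toNat := by
    simp only [List.length_take, List.length_drop]; omega
  have hlen12 : ((List.replicate N (0:Int)).take dc0.toNat ++
      (mrow.drop (dc0 - col).toNat).take ((dc1 - col).toNat - (dc0 - col).toNat)).length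
      = dc1.toNat := by
    rw [List.length_append, hlen1, hlenmid]; omega
  by_cases hc1 : c < dc0.toNat
  · rw [List.getD_append _ _ _ _ (by omega), List.getD_append _ _ _ _ (by omega)]
    rw [List.take_replicate]
    rw [getD_replicate_zero, if_neg (by omega)]
  · by_cases hc2 : c < dc1.toNat
    · rw [List.getD_append _ _ _ _ (by omega), List.getD_append_right _ _ _ _ (by omega), hlen1]
      have hidx : (dc0 - col).toNat + (c - dc0.toNat) < mrow.length := by omega
      rw [List.getD_eq_getElem _ _ (by simp only [List.length_take, List.length_drop]; omega)]
      rw [List.getElem_take, List.getElem_drop]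
      rw [if_pos (by omega)]
      rw [List.getD_eq_getElem _ _ (by omega)]
      congr 1
      omega
    · rw [List.getD_append_right _ _ _ _ (by omega), hlen12]
      rw [List.drop_replicate, getD_replicate_zero, if_neg (by omega)]

/-- Pre_ gives: every source row feeding a nonempty destination column window is long enough -/
theorem pre_row_long (mx : List (List Int)) (row col : Int)
    (hpre : Pre_move_row_col mx row col) (r : Nat) (hrN : r < mx.length)
    (hr0 : 0 ≤ (r : Int) - row) (hrN' : (r : Int) - row < (mx.length : Int))
    (hw : max 0 col < min (mx.length : Int) ((mx.length : Int) + col)) :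
    min (mx.length : Int) ((mx.length : Int) + col) - col ≤
      ((mx.getD ((r : Int) - row).toNat []).length : Int) := by
  set N := mx.length with hN
  set i : Nat := ((r : Int) - row).toNat with hi
  set j : Nat := (min (N : Int) ((N : Int) + col) - col - 1).toNat with hj
  have hiN : i < N := by omega
  have hjN : j < N := by omega
  have := hpre i (by rw [List.mem_range]; omega) j (by rw [List.mem_range]; omega)
    ⟨by omega, by omega, by omega, by omega⟩
  omega

theorem B_char (mx : List (List Int)) (row col : Int)
    (hpre : Pre_move_row_col mx row col) :
    (move_row_col_alt mx row col).length = mx.length ∧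
    (∀ rw ∈ move_row_col_alt mx row col, rw.length = mx.length) ∧
    ∀ r c : Nat, r < mx.length → c < mx.length →
      g2 (move_row_col_alt mx row col) r c =
        if 0 ≤ (r : Int) - row ∧ (r : Int) - row < (mx.length : Int) ∧
           0 ≤ (c : Int) - col ∧ (c : Int) - col < (mx.length : Int)
        then (mx.getD ((r : Int) - row).toNat []).getD ((c : Int) - col).toNat 0
        else 0 := by
  set N := mx.length with hN
  rw [move_row_col_alt_eq]
  by_cases hw : max 0 row < min (N : Int) ((N : Int) + row) ∧
      max 0 col < min (N : Int) ((N : Int) + col)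
  · rw [if_pos hw]
    obtain ⟨hwr, hwc⟩ := hw
    obtain ⟨blen, bget⟩ := foldB_char mx row col (max 0 col) (min (N : Int) ((N : Int) + col)) N
      (min (N : Int) ((N : Int) + row)) (by omega)
      (min (N : Int) ((N : Int) + row) - max 0 row).toNat (max 0 row) rfl (by omega)
      (List.replicate N (List.replicate N (0 : Int))) (by simp)
    set out := (PySem.List.pyRange (max 0 row) (min (N : Int) ((N : Int) + row)) 1).foldl
      (stepB mx row col (max 0 col) (min (N : Int) ((N : Int) + col)))
      (List.replicate N (List.replicate N (0 : Int))) with hout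
    have hrowfact : ∀ k : Nat, k < N →
        out.getD k [] =
          if max 0 row ≤ (k : Int) ∧ (k : Int) < min (N : Int) ((N : Int) + row)
          then rowB mx row col (max 0 col) (min (N : Int) ((N : Int) + col)) (List.replicate N (0:Int)) k
          else List.replicate N (0 : Int) := by
      intro k hk
      rw [bget k]
      rw [List.getD_eq_getElem _ _ (by simpa using hk), List.getElem_replicate]
    refine ⟨blen, ?_, ?_⟩
    · intro rw_ hrw
      obtain ⟨k, hk, hkeq⟩ := List.mem_iff_getElem.mp hrw
      have hkN : k < N := by omega
      have : rw_ = out.getD k [] := by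
        rw [List.getD_eq_getElem _ _ hk, hkeq]
      rw [this, hrowfact k hkN]
      by_cases h : max 0 row ≤ (k : Int) ∧ (k : Int) < min (N : Int) ((N : Int) + row)
      · rw [if_pos h]
        exact rowB_len mx row col _ _ N k (by omega) (by omega) (by omega) (by omega)
          (pre_row_long mx row col hpre k hkN (by omega) (by omega) hwc)
      · rw [if_neg h]
        simp
    · intro r c hr hc
      unfold g2
      rw [hrowfact r hr]
      by_cases h : max 0 row ≤ (r : Int) ∧ (r : Int) < min (N : Int) ((N : Int) + row)
      · rw [if_pos h, rowB_getD mx row col _ _ N r c (by omega) (by omega) (by omega) (by omega)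
          (pre_row_long mx row col hpre r hr (by omega) (by omega) hwc)]
        by_cases h2 : max 0 col ≤ (c : Int) ∧ (c : Int) < min (N : Int) ((N : Int) + col)
        · rw [if_pos h2, if_pos (by omega)]
        · rw [if_neg h2, if_neg (by omega)]
      · rw [if_neg h, getD_replicate_zero, if_neg (by omega)]
  · rw [if_neg hw]
    rw [not_and_or] at hw
    refine ⟨by simp [hN], ?_, ?_⟩
    · intro rw_ hrw
      rw [List.eq_of_mem_replicate hrw]
      simp [hN]
    intro r c hr hc
    unfold g2
    have : (List.replicate N (List.replicate N (0:Int))).getD r [] = List.replicate N (0:Int) := by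
      rw [List.getD_eq_getElem _ _ (by simpa using hr), List.getElem_replicate]
    rw [this, getD_replicate_zero, if_neg (by omega)]

-- ===== A characterization at the top level =====

theorem A_char (mx : List (List Int)) (row col : Int) :
    shapeN mx.length (move_row_col mx row col) ∧
    ∀ r c : Nat, r < mx.length → c < mx.length →
      g2 (move_row_col mx row col) r c =
        if 0 ≤ (r : Int) - row ∧ (r : Int) - row < (mx.length : Int) ∧
           0 ≤ (c : Int) - col ∧ (c : Int) - col < (mx.length : Int)
        then (mx.getD ((r : Int) - row).toNat []).getD ((c : Int) - col).toNat 0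
        else 0 := by
  set N := mx.length with hN
  have hinit : shapeN N ((List.range N).map (fun _ => (List.range N).map (fun _ => (0 : Int)))) := by
    constructor
    · simp
    · intro rw_ hrw
      simp only [List.mem_map] at hrw
      obtain ⟨x, hx, hxeq⟩ := hrw
      rw [← hxeq]
      simp
  have hrep : (List.range N).map (fun _ => (List.range N).map (fun _ => (0 : Int))) =
      List.replicate N (List.replicate N (0 : Int)) := by
    simp [List.map_const']
  have hinitg2 : ∀ r c : Nat, g2 ((List.range N).map (fun _ => (List.range N).map (fun _ => (0 : Int)))) r c = 0 := by
    intro r c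
    unfold g2
    rw [hrep]
    rcases Nat.lt_or_ge r N with h | h
    · have hrow : (List.replicate N (List.replicate N (0:Int))).getD r [] = List.replicate N (0:Int) := by
        rw [List.getD_eq_getElem _ _ (by simpa using h), List.getElem_replicate]
      rw [hrow, getD_replicate_zero]
    · have hrow : (List.replicate N (List.replicate N (0:Int))).getD r [] = [] :=
        List.getD_eq_default _ _ (by simpa using h)
      rw [hrow]
      rfl
  rw [move_row_col_eq]
  obtain ⟨hshape, hget⟩ := outerA_char mx row col N N _ hinit
  refine ⟨hshape, ?_⟩
  intro r c hr hc
  rw [hget r c, hinitg2 r c]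
  by_cases h : 0 ≤ (r : Int) - row ∧ (r : Int) - row < N ∧ (r : Int) < N ∧
      0 ≤ (c : Int) - col ∧ (c : Int) - col < N ∧ (c : Int) < N
  · rw [if_pos h, if_pos (by omega)]
  · rw [if_neg h, if_neg (by omega)]

-- ===== VERDICT (by name: the statement is the Claim_ definition above) =====
theorem move_row_col_spec : Claim_equal_move_row_col := by
  intro mx row col _ hpre
  unfold Spec_move_row_col
  obtain ⟨⟨halen, harows⟩, haget⟩ := A_char mx row col
  obtain ⟨hblen, hbrows, hbget⟩ := B_char mx row col hpre
  apply List.ext_getElem (by omega)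
  intro r hr1 hr2
  have hrN : r < mx.length := by omega
  have hrowA : (move_row_col mx row col)[r].length = mx.length :=
    harows _ (List.getElem_mem hr1)
  have hrowB : (move_row_col_alt mx row col)[r].length = mx.length :=
    hbrows _ (List.getElem_mem hr2)
  apply List.ext_getElem (by omega)
  intro c hc1 hc2
  have hcN : c < mx.length := by omega
  have e1 : (move_row_col mx row col)[r][c] = g2 (move_row_col mx row col) r c := by
    unfold g2
    rw [List.getD_eq_getElem _ _ hr1, List.getD_eq_getElem _ _ hc1]
  have e2 : (move_row_col_alt mx row col)[r][c] = g2 (move_row_col_alt mx row col) r c := by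
    unfold g2
    rw [List.getD_eq_getElem _ _ hr2, List.getD_eq_getElem _ _ hc2]
  rw [e1, e2, haget r c hrN hcN, hbget r c hrN hcN]
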